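-- pv_equiv track=rewrite | github.com/haukesteffen/AutoKaggle | harness/analysis_runner.py | _extract_legacy_question
-- ===== SOURCE A (Python) =====
-- def _extract_legacy_question(hypothesis_text: str) -> str | None:
--     lines = hypothesis_text.splitlines()
--     for index, line in enumerate(lines):
--         stripped = line.strip()
--         for prefix in ("**Hypothesis:**", "**Question:**"):
--             if not stripped.startswith(prefix):
--                 continue
--             title = stripped.removeprefix(prefix).strip()
--             if title:
--                 return title
--             fallback_title = _next_nonempty_line(lines[index + 1 :])
--             if fallback_title:
--                 return fallback_title
--     return None
--
-- def _next_nonempty_line(lines: list[str]) -> str | None: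
--     for line in lines:
--         stripped = line.strip()
--         if stripped:
--             return stripped
--     return None
-- ===== SOURCE B (Python) =====
-- def _extract_legacy_question(hypothesis_text: str) -> str | None:
--     # Single linear pass: a `pending` flag replaces the nested forward sub-scan.
--     pending = False
--     for line in hypothesis_text.splitlines():
--         stripped = line.strip()
--         if not stripped:
--             continue
--         if pending:
--             return stripped
--         for prefix in ("**Hypothesis:**", "**Question:**"):
--             if stripped.startswith(prefix):
--                 title = stripped[len(prefix):].strip()
--                 if title:
--                     return title
--                 pending = True
--                 break
--     return None
-- ===== Notes on version B (the rewrite author's own statement) =====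
-- stated objective: alternative
-- what changed: Replaces A's nested traversal (outer enumerate loop plus a forward sub-scan via the _next_nonempty_line helper on lines[index+1:]) with a single linear pass carrying a boolean pending flag that is armed by an empty-title prefix line and returns the next nonempty stripped line.
import Mathlib
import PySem

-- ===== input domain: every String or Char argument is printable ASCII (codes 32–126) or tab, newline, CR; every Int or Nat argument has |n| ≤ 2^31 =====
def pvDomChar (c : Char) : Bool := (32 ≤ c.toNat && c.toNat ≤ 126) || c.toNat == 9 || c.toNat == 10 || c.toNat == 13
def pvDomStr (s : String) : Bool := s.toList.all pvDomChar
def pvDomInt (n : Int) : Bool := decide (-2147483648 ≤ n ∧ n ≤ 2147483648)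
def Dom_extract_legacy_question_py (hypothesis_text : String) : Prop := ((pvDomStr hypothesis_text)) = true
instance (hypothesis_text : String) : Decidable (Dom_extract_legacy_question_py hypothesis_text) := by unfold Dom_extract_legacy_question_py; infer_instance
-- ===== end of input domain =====

-- B replaces A's nested forward sub-scan (_next_nonempty_line on lines[index+1:]) by one
-- linear pass holding a boolean `pending` flag (objective: alternative decomposition).


-- ===== PORT A =====
-- str.removeprefix has no PySem primitive: ported by hand, exact — drop len(prefix)
-- code points when the prefix matches, else the string unchanged.
def pvRemoveprefix (s p : String) : String :=
  if PySem.Str.startswith s p then String.mk (s.toList.drop p.toList.length) else s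

-- _next_nonempty_line
def pvNextNonemptyLine : List String → Option String
  | [] => none
  | line :: rest =>
    let stripped := PySem.Str.strip line
    if stripped ≠ "" then some stripped else pvNextNonemptyLine rest

-- body of A's inner `for prefix in (...)`: some v = `return v`, none = continue
def pvPrefixStep (stripped : String) (restLines : List String) (p : String) : Option String :=
  if PySem.Str.startswith stripped p then
    let title := PySem.Str.strip (pvRemoveprefix stripped p)
    if title ≠ "" then some title
    else
      match pvNextNonemptyLine restLines with  -- lines[index + 1:]
      | some fallback => if fallback ≠ "" then some fallback else none
      | none => none
  else none

-- A's outer loop: recursion over the line list, the tail being lines[index+1:]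
def pvALoop : List String → Option String
  | [] => none
  | line :: rest =>
    let stripped := PySem.Str.strip line
    match pvPrefixStep stripped rest "**Hypothesis:**" with
    | some v => some v
    | none =>
      match pvPrefixStep stripped rest "**Question:**" with
      | some v => some v
      | none => pvALoop rest

def extract_legacy_question_py (hypothesis_text : String) : Option String :=
  pvALoop (PySem.Str.splitlines hypothesis_text)

-- ===== PORT B =====
-- B's single pass with the `pending` flag; the inner two-prefix loop of Source B is
-- unrolled into the two literal prefixes.  stripped[len(prefix):] is exact as
-- toList.drop len(prefix) since the slice start is in range when the prefix matches.
def pvBLoop : Bool → List String → Option String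
  | _, [] => none
  | pending, line :: rest =>
    let stripped := PySem.Str.strip line
    if stripped = "" then pvBLoop pending rest
    else if pending then some stripped
    else if PySem.Str.startswith stripped "**Hypothesis:**" then
      let title := PySem.Str.strip (String.mk (stripped.toList.drop 15))
      if title ≠ "" then some title else pvBLoop true rest
    else if PySem.Str.startswith stripped "**Question:**" then
      let title := PySem.Str.strip (String.mk (stripped.toList.drop 13))
      if title ≠ "" then some title else pvBLoop true rest
    else pvBLoop false rest

def extract_legacy_question_py_alt (hypothesis_text : String) : Option String :=
  pvBLoop false (PySem.Str.splitlines hypothesis_text)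

-- ===== PRECONDITION & SPEC =====
def Spec_extract_legacy_question_py (hypothesis_text : String) (out : Option String) : Prop := out = extract_legacy_question_py_alt hypothesis_text
instance (hypothesis_text : String) (out : Option String) : Decidable (Spec_extract_legacy_question_py hypothesis_text out) := by unfold Spec_extract_legacy_question_py; infer_instance

-- ===== CLAIM (what is proved, stated in full; the proofs are below) =====
def Claim_equal_extract_legacy_question_py : Prop := ∀ (hypothesis_text : String), Dom_extract_legacy_question_py hypothesis_text → Spec_extract_legacy_question_py hypothesis_text (extract_legacy_question_py hypothesis_text)

-- ===== LEMMAS AND PROOFS =====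

-- a value produced by _next_nonempty_line is never the empty string
theorem pvNext_ne_empty (ls : List String) (f : String)
    (h : pvNextNonemptyLine ls = some f) : f ≠ "" := by
  induction ls with
  | nil => simp [pvNextNonemptyLine] at h
  | cons l rest ih =>
    simp only [pvNextNonemptyLine] at h
    split at h
    · rename_i hne; cases h; exact hne
    · exact ih h

-- pending = true scans for the next nonempty stripped line, exactly _next_nonempty_line
theorem pvBLoop_true (ls : List String) : pvBLoop true ls = pvNextNonemptyLine ls := by
  induction ls with
  | nil => rfl
  | cons l rest ih =>
    simp only [pvBLoop, pvNextNonemptyLine]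
    by_cases hs : PySem.Str.strip l = "" <;> simp [hs, ih]

-- the empty string starts with neither prefix
theorem pvEmpty_no_prefix :
    PySem.Chars.startswith ([] : List Char) ['*', '*', 'H', 'y', 'p', 'o', 't', 'h', 'e', 's', 'i', 's', ':', '*', '*'] = false ∧
    PySem.Chars.startswith ([] : List Char) ['*', '*', 'Q', 'u', 'e', 's', 't', 'i', 'o', 'n', ':', '*', '*'] = false := by decide

-- when no nonempty line remains, A's loop returns None
theorem pvALoop_all_empty (ls : List String) (h : pvNextNonemptyLine ls = none) :
    pvALoop ls = none := by
  induction ls with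
  | nil => rfl
  | cons l rest ih =>
    simp only [pvNextNonemptyLine] at h
    split at h
    · exact absurd h (by simp)
    · rename_i hs
      simp only [not_not] at hs
      simp [pvALoop, pvPrefixStep, hs, pvEmpty_no_prefix.1, pvEmpty_no_prefix.2, ih h]

-- a string cannot start with both prefixes (they differ at index 2: 'H' vs 'Q')
theorem pvPrefix_disjoint (cs : List Char)
    (h : PySem.Chars.startswith cs ['*', '*', 'H', 'y', 'p', 'o', 't', 'h', 'e', 's', 'i', 's', ':', '*', '*'] = true) :
    PySem.Chars.startswith cs ['*', '*', 'Q', 'u', 'e', 's', 't', 'i', 'o', 'n', ':', '*', '*'] = false := by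
  by_contra hq
  simp only [Bool.not_eq_false] at hq
  rw [PySem.Chars.startswith_iff] at h hq
  obtain ⟨t1, ht1⟩ := h
  obtain ⟨t2, ht2⟩ := hq
  have hH : cs[2]? = some 'H' := by
    rw [← ht1, List.getElem?_append_left (by decide)]; rfl
  have hQ : cs[2]? = some 'Q' := by
    rw [← ht2, List.getElem?_append_left (by decide)]; rfl
  rw [hH] at hQ; simp at hQ

-- main loop equivalence: A's nested traversal equals B's pass with pending = false
theorem pvLoop_eq (ls : List String) : pvALoop ls = pvBLoop false ls := by
  induction ls with
  | nil => rfl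
  | cons l rest ih =>
    simp only [pvALoop, pvBLoop]
    by_cases hs : PySem.Str.strip l = ""
    · simp [pvPrefixStep, hs, pvEmpty_no_prefix.1, pvEmpty_no_prefix.2, ih]
    · simp only [hs, if_neg hs]
      by_cases hH : PySem.Chars.startswith (PySem.Chars.strip l.toList) ['*', '*', 'H', 'y', 'p', 'o', 't', 'h', 'e', 's', 'i', 's', ':', '*', '*'] = true
      · have hQ := pvPrefix_disjoint _ hH
        have hrp : pvRemoveprefix (PySem.Str.strip l) "**Hypothesis:**"
            = String.mk (List.drop 15 (PySem.Chars.strip l.toList)) := by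
          simp [pvRemoveprefix, hH]
        by_cases ht : PySem.Str.strip (String.mk (List.drop 15 (PySem.Chars.strip l.toList))) = ""
        · simp only [pvPrefixStep, hrp]
          simp only [hH, hQ, ht]
          cases hnx : pvNextNonemptyLine rest with
          | none => simp [pvALoop_all_empty rest hnx, pvBLoop_true, hnx, hH, hQ, ht]
          | some f => simp [pvNext_ne_empty rest f hnx, pvBLoop_true, hnx, hH, ht]
        · simp only [pvPrefixStep, hrp]
          simp [hH, ht]
      · simp only [Bool.not_eq_true] at hH
        by_cases hQ : PySem.Chars.startswith (PySem.Chars.strip l.toList) ['*', '*', 'Q', 'u', 'e', 's', 't', 'i', 'o', 'n', ':', '*', '*'] = true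
        · have hrp : pvRemoveprefix (PySem.Str.strip l) "**Question:**"
              = String.mk (List.drop 13 (PySem.Chars.strip l.toList)) := by
            simp [pvRemoveprefix, hQ]
          by_cases ht : PySem.Str.strip (String.mk (List.drop 13 (PySem.Chars.strip l.toList))) = ""
          · simp only [pvPrefixStep, hrp]
            simp only [hH, hQ, ht]
            cases hnx : pvNextNonemptyLine rest with
            | none => simp [pvALoop_all_empty rest hnx, pvBLoop_true, hnx, hH, hQ, ht]
            | some f => simp [pvNext_ne_empty rest f hnx, pvBLoop_true, hnx, hH, hQ, ht]
          · simp only [pvPrefixStep, hrp]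
            simp [hH, hQ, ht]
        · simp only [Bool.not_eq_true] at hQ
          simp [pvPrefixStep, hH, hQ, ih]

-- ===== VERDICT (by name: the statement is the Claim_ definition above) =====
theorem extract_legacy_question_py_spec : Claim_equal_extract_legacy_question_py := by
  intro t _
  unfold Spec_extract_legacy_question_py extract_legacy_question_py extract_legacy_question_py_alt
  exact pvLoop_eq _
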